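-- pv_equiv track=rewrite | github.com/thumbe12856/competitive-programming | kickstart/2021/roundB/1/solve.py | solve
-- ===== SOURCE A (Python) =====
-- def solve(N, S):
--     ans = []
--     last_c = -1
--     cnt = 0
--     for i in range(N):
--         c = ord(S[i])
--         if c > last_c:
--             cnt += 1
--         else:
--             cnt = 1
--         last_c = c
--         ans.append(str(cnt))
--     return (" ").join(ans)
-- ===== SOURCE B (Python) =====
-- def solve(N, S):
--     # Scan the prefix once, recording the length of each maximal strictly
--     # increasing run, then expand each run length L into 1..L.
--     runs = []
--     prev = -1
--     cur = 0
--     for ch in S[:max(0, N)]: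
--         c = ord(ch)
--         if c > prev:
--             cur += 1
--         else:
--             runs.append(cur)
--             cur = 1
--         prev = c
--     if cur > 0:
--         runs.append(cur)
--     return " ".join(str(j) for L in runs for j in range(1, L + 1))
-- ===== Notes on version B (the rewrite author's own statement) =====
-- stated objective: alternative
-- what changed: B replaces A's per-position counter-with-reset loop by a run decomposition: one scan records the lengths of the maximal strictly-increasing runs of the prefix, and a separate expansion pass turns each run length L into 1..L before joining.
import Mathlib
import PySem

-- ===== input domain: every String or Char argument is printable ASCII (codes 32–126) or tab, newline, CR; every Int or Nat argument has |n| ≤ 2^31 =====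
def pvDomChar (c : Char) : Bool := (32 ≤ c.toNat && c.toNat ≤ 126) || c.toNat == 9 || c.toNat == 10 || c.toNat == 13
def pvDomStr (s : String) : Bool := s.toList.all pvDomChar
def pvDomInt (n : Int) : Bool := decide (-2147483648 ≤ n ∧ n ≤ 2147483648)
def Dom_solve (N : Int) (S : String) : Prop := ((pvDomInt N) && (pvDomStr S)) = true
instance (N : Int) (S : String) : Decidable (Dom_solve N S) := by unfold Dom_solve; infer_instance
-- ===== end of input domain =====

-- B restates A's counter-with-reset loop as a run decomposition (record maximal
-- strictly-increasing run lengths, then expand each L into 1..L); same cost, different structure.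

-- ===== PORT A =====
def solve (N : Int) (S : String) : String :=
  let cs := S.toList
  let st := (PySem.List.pyRange 0 N).foldl
    (fun (st : List String × Int × Int) i =>
      match PySem.List.pyGet? cs i with
      | none => st   -- Python raises IndexError here; such inputs are outside Pre_solve
      | some ch =>
        let c : Int := (ch.toNat : Int)
        let cnt := if c > st.2.1 then st.2.2 + 1 else 1
        (st.1 ++ [PySem.Int.toStr cnt], c, cnt))
    ([], -1, 0)
  PySem.Str.join " " st.1

-- ===== PORT B =====
def solve_alt (N : Int) (S : String) : String :=
  let pref := PySem.List.slice S.toList none (some (max 0 N))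
  let st := pref.foldl
    (fun (st : List Int × Int × Int) ch =>
      let c : Int := (ch.toNat : Int)
      if c > st.2.1 then (st.1, c, st.2.2 + 1)
      else (st.1 ++ [st.2.2], c, 1))
    ([], -1, 0)
  let runs := if st.2.2 > 0 then st.1 ++ [st.2.2] else st.1
  PySem.Str.join " " (runs.flatMap (fun L => (PySem.List.pyRange 1 (L + 1)).map PySem.Int.toStr))

-- ===== PRECONDITION & SPEC =====
-- Pre_solve: exactly the inputs where A returns (S[i] is read for every i in range(N)).
def Pre_solve (N : Int) (S : String) : Prop := N ≤ (S.toList.length : Int)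
instance (N : Int) (S : String) : Decidable (Pre_solve N S) := by unfold Pre_solve; infer_instance
def pvWitness_solve : Int × String := (3, "aba")

def Spec_solve (N : Int) (S : String) (out : String) : Prop := out = solve_alt N S
instance (N : Int) (S : String) (out : String) : Decidable (Spec_solve N S out) := by unfold Spec_solve; infer_instance

-- ===== CLAIM (what is proved, stated in full; the proofs are below) =====
def Claim_equal_solve : Prop := ∀ (N : Int) (S : String), Dom_solve N S → Pre_solve N S → Spec_solve N S (solve N S)

-- ===== LEMMAS AND PROOFS =====

-- A's loop body on one character (state: output strings, last_c, cnt)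
def aStep (st : List String × Int × Int) (ch : Char) : List String × Int × Int :=
  let c : Int := (ch.toNat : Int)
  let cnt := if c > st.2.1 then st.2.2 + 1 else 1
  (st.1 ++ [PySem.Int.toStr cnt], c, cnt)

-- B's loop body on one character (state: run lengths, prev, cur)
def bStep (st : List Int × Int × Int) (ch : Char) : List Int × Int × Int :=
  let c : Int := (ch.toNat : Int)
  if c > st.2.1 then (st.1, c, st.2.2 + 1)
  else (st.1 ++ [st.2.2], c, 1)

-- expansion of run lengths, and of the pending partial run
def ex (runs : List Int) : List String :=
  runs.flatMap (fun L => (PySem.List.pyRange 1 (L + 1)).map PySem.Int.toStr)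
def part (cur : Int) : List String := (PySem.List.pyRange 1 (cur + 1)).map PySem.Int.toStr

lemma ex_append_singleton (runs : List Int) (c : Int) :
    ex (runs ++ [c]) = ex runs ++ part c := by
  simp [ex, part]

lemma part_succ (cur : Int) (h : 0 ≤ cur) :
    part (cur + 1) = part cur ++ [PySem.Int.toStr (cur + 1)] := by
  unfold part
  rw [show cur + 1 + 1 = (cur + 1) + 1 from rfl,
      PySem.List.pyRange_one_succ_right (by omega)]
  simp

-- the ports, re-expressed through the named step functions (definitional)
lemma solveA_eq (N : Int) (S : String) :
    solve N S = PySem.Str.join " "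
      (((PySem.List.pyRange 0 N).foldl
        (fun (st : List String × Int × Int) (i : Int) =>
          match PySem.List.pyGet? S.toList i with
          | none => st
          | some ch => aStep st ch) ([], -1, 0)).1) := rfl

lemma solveB_eq (N : Int) (S : String) :
    solve_alt N S =
      (let st := (PySem.List.slice S.toList none (some (max 0 N))).foldl bStep ([], -1, 0)
       PySem.Str.join " " (ex (if st.2.2 > 0 then st.1 ++ [st.2.2] else st.1))) := rfl

-- A's indexed loop over range(N) is the character loop over the prefix take n
lemma index_fold (cs : List Char) (n : Nat) (h : n ≤ cs.length)
    (st : List String × Int × Int) :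
    (PySem.List.pyRange 0 (n : Int)).foldl
      (fun (st : List String × Int × Int) (i : Int) =>
        match PySem.List.pyGet? cs i with
        | none => st
        | some ch => aStep st ch) st
    = (cs.take n).foldl aStep st := by
  induction n generalizing st with
  | zero => simp [PySem.List.pyRange]
  | succ n ih =>
    rw [show ((n + 1 : Nat) : Int) = (n : Int) + 1 by push_cast; ring,
        PySem.List.pyRange_one_succ_right (by positivity),
        List.foldl_append, ih (by omega),
        List.take_succ_eq_append_getElem (by omega), List.foldl_append]
    simp [PySem.List.pyGet?_natCast, List.getElem?_eq_getElem (by omega : n < cs.length)]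

-- the core invariant: A's output is the expansion of B's runs plus the pending run
lemma loop_rel (l : List Char) : ∀ (runs : List Int) (last cur : Int), 0 ≤ cur →
    (l.foldl aStep (ex runs ++ part cur, last, cur)
      = (ex (l.foldl bStep (runs, last, cur)).1 ++ part (l.foldl bStep (runs, last, cur)).2.2,
         (l.foldl bStep (runs, last, cur)).2.1, (l.foldl bStep (runs, last, cur)).2.2))
    ∧ 0 ≤ (l.foldl bStep (runs, last, cur)).2.2 := by
  induction l with
  | nil => intro runs last cur h; exact ⟨rfl, h⟩
  | cons ch t ih =>
    intro runs last cur h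
    by_cases hc : ((ch.toNat : Int)) > last
    · have hstep : aStep (ex runs ++ part cur, last, cur) ch
          = (ex runs ++ part (cur + 1), (ch.toNat : Int), cur + 1) := by
        simp [aStep, hc, part_succ cur h]
      have hb : bStep (runs, last, cur) ch = (runs, (ch.toNat : Int), cur + 1) := by
        simp [bStep, hc]
      simpa [List.foldl_cons, hstep, hb] using ih runs (ch.toNat : Int) (cur + 1) (by omega)
    · have hstep : aStep (ex runs ++ part cur, last, cur) ch
          = (ex (runs ++ [cur]) ++ part 1, (ch.toNat : Int), 1) := by
        simp [aStep, hc, ex_append_singleton]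
        rfl
      have hb : bStep (runs, last, cur) ch = (runs ++ [cur], (ch.toNat : Int), 1) := by
        simp [bStep, hc]
      simpa [List.foldl_cons, hstep, hb] using ih (runs ++ [cur]) (ch.toNat : Int) 1 (by omega)

-- ===== VERDICT (by name: the statement is the Claim_ definition above) =====
theorem solve_spec : Claim_equal_solve := by
  intro N S _ hpre
  unfold Spec_solve
  unfold Pre_solve at hpre
  rw [solveA_eq, solveB_eq]
  have hslice : PySem.List.slice S.toList none (some (max 0 N)) = S.toList.take N.toNat := by
    rw [PySem.List.slice_to S.toList (by omega)]
    congr 1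
    omega
  have hrange : PySem.List.pyRange 0 N = PySem.List.pyRange 0 ((N.toNat : Nat) : Int) := by
    by_cases hN : 0 ≤ N
    · rw [Int.toNat_of_nonneg hN]
    · rw [show (N.toNat : Int) = 0 by omega]
      simp [PySem.List.pyRange]
      omega
  rw [hrange, hslice, index_fold S.toList N.toNat (by omega) ([], -1, 0)]
  have h0 : (([] : List String), (-1 : Int), (0 : Int)) = (ex [] ++ part 0, (-1 : Int), (0 : Int)) := by
    simp [ex, part, PySem.List.pyRange]
  rw [h0]
  obtain ⟨heq, hpos⟩ := loop_rel (S.toList.take N.toNat) [] (-1) 0 le_rfl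
  rw [heq]
  set b := (S.toList.take N.toNat).foldl bStep ([], -1, 0) with hbdef
  by_cases hcur : b.2.2 > 0
  · simp only [hcur, if_pos, ex_append_singleton]
  · have h2 : b.2.2 = 0 := by omega
    simp [h2, part, PySem.List.pyRange]
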